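-- pv_equiv track=rewrite | github.com/david-hoze/scientific-writing | circuit-presheaf/scripts/n5_scan.py | compute_profiles
-- ===== SOURCE A (Python) =====
-- from collections import defaultdict
--
-- def compute_profiles(nodes, csp_edges):
--     """Profile reduction: collapse interchangeable domain elements."""
--     node_edge_keys = defaultdict(list)
--
--     for eidx, (ni, nj, gi, gj) in enumerate(csp_edges):
--         inv_i = {}
--         for key, indices in gi.items():
--             for idx in indices:
--                 inv_i[idx] = key
--         node_edge_keys[ni].append((eidx, inv_i))
--
--         inv_j = {}
--         for key, indices in gj.items():
--             for idx in indices: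
--                 inv_j[idx] = key
--         node_edge_keys[nj].append((eidx, inv_j))
--
--     profiles = {}
--     profile_keys = {}
--
--     for ni, dom_size in nodes.items():
--         edge_keys = sorted(node_edge_keys[ni], key=lambda x: x[0])
--         prof_groups = defaultdict(list)
--         for dom_idx in range(dom_size):
--             profile = tuple(
--                 (eidx, inv.get(dom_idx, "?"))
--                 for eidx, inv in edge_keys
--             )
--             prof_groups[profile].append(dom_idx)
--
--         sorted_profiles = sorted(prof_groups.keys())
--         profiles[ni] = {}
--         profile_keys[ni] = {}
--         for pidx, prof in enumerate(sorted_profiles):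
--             profiles[ni][pidx] = prof_groups[prof]
--             profile_keys[ni][pidx] = {eidx: key for eidx, key in prof}
--
--     return profiles, profile_keys
-- ===== SOURCE B (Python) =====
-- def compute_profiles(nodes, csp_edges):
--     """Profile reduction via partition refinement: split groups edge by edge
--     instead of hashing each element's full profile tuple."""
--     entries = []
--     for eidx, (ni, nj, gi, gj) in enumerate(csp_edges):
--         entries.append((ni, eidx, {idx: key for key, indices in gi.items() for idx in indices}))
--         entries.append((nj, eidx, {idx: key for key, indices in gj.items() for idx in indices}))
--     by_node = {}
--     for n, eidx, inv in entries:
--         by_node.setdefault(n, []).append((eidx, inv))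
--
--     profiles = {}
--     profile_keys = {}
--     for ni, dom_size in nodes.items():
--         members0 = list(range(dom_size))
--         parts = [(members0, ())] if members0 else []
--         for eidx, inv in by_node.get(ni, []):
--             refined = []
--             for members, sig in parts:
--                 buckets = {}
--                 for d in members:
--                     buckets.setdefault(inv.get(d, "?"), []).append(d)
--                 refined.extend((mem, sig + ((eidx, key),)) for key, mem in buckets.items())
--             parts = refined
--         parts.sort(key=lambda p: p[1])
--         profiles[ni] = {pidx: members for pidx, (members, _) in enumerate(parts)}
--         profile_keys[ni] = {pidx: dict(sig) for pidx, (_, sig) in enumerate(parts)}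
--     return profiles, profile_keys
-- ===== Notes on version B (the rewrite author's own statement) =====
-- stated objective: alternative
-- what changed: Phase 2 replaces hashing each element's full profile tuple into a defaultdict by incremental partition refinement: one group per node is split edge by edge (bucketed by that edge's key), each group carrying its growing signature, and the groups are finally sorted by signature; phase 1 builds a flat entries list and groups it per node in a second pass instead of building the per-node dict inline.
import Mathlib
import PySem

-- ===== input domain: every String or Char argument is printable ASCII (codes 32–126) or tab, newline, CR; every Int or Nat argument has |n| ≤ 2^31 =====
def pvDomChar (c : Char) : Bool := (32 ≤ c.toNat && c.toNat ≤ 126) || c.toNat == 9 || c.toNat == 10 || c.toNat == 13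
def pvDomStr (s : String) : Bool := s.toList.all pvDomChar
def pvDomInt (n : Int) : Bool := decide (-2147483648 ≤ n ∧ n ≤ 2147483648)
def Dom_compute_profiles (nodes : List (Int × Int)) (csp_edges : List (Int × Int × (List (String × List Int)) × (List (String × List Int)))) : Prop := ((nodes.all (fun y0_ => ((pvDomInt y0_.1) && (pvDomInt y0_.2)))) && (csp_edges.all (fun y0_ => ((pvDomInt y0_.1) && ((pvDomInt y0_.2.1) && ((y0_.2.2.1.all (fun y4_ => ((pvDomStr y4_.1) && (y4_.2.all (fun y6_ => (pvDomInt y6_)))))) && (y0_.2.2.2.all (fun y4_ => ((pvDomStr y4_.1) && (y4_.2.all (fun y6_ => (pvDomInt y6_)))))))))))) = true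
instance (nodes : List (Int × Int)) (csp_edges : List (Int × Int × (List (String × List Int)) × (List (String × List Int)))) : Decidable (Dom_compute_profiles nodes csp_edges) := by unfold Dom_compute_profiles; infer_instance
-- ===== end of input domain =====

-- B replaces A's hash-grouping of per-element full profile tuples by incremental partition
-- refinement: one group per node is split edge by edge, each group carrying its signature
-- (objective: alternative algorithm, same results).

-- Python compares the profile tuples ((eidx, key), …) lexicographically, ints by < and
-- strings by code points; this order-isomorphic Lex encoding is that comparison exactly,
-- and both ports sort through it (it is the 'key' under which PySem.List.sorted compares).
def pvProfKey (s : List (Int × String)) : List (Lex (Int × List Char)) :=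
  s.map (fun p => toLex (p.1, p.2.toList))

-- ===== PORT A =====
-- inv = {}; for key, indices in gi.items(): for idx in indices: inv[idx] = key
def pvInvA (g : List (String × List Int)) : PySem.Dict Int String :=
  (PySem.Dict.ofList g).items.foldl
    (fun inv kv => kv.2.foldl (fun inv2 idx => inv2.insert idx kv.1) inv) PySem.Dict.empty

-- the first loop of A: node_edge_keys (defaultdict-append modelled by Dict.modify _ [] (· ++ [_]))
def pvNekA (csp_edges : List (Int × Int × (List (String × List Int)) × (List (String × List Int)))) :
    PySem.Dict Int (List (Int × PySem.Dict Int String)) :=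
  (PySem.List.enumerate csp_edges 0).foldl
    (fun nek ee =>
      (nek.modify ee.2.1 [] (· ++ [(ee.1, pvInvA ee.2.2.2.1)])).modify
        ee.2.2.1 [] (· ++ [(ee.1, pvInvA ee.2.2.2.2)]))
    PySem.Dict.empty

-- profile = tuple((eidx, inv.get(dom_idx, "?")) for eidx, inv in edge_keys)
def pvProfile (ek : List (Int × PySem.Dict Int String)) (d : Int) : List (Int × String) :=
  ek.map (fun p => (p.1, p.2.getD d "?"))

-- body of A's 'for ni, dom_size in nodes.items()' loop (prof_groups[prof] is always present, so getD is exact)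
def pvNodeStepA (nek : PySem.Dict Int (List (Int × PySem.Dict Int String)))
    (st : PySem.Dict Int (PySem.Dict Int (List Int)) × PySem.Dict Int (PySem.Dict Int (PySem.Dict Int String)))
    (nd : Int × Int) :
    PySem.Dict Int (PySem.Dict Int (List Int)) × PySem.Dict Int (PySem.Dict Int (PySem.Dict Int String)) :=
  let ek := PySem.List.sorted (nek.getD nd.1 []) (fun x => x.1) false
  let pg := (PySem.List.pyRange 0 nd.2 1).foldl
    (fun d i => d.modify (pvProfile ek i) [] (· ++ [i])) PySem.Dict.empty
  let sp := PySem.List.sorted pg.keys pvProfKey false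
  (PySem.List.enumerate sp 0).foldl
    (fun st2 pp =>
      (st2.1.modify nd.1 PySem.Dict.empty (fun m => m.insert pp.1 (pg.getD pp.2 [])),
       st2.2.modify nd.1 PySem.Dict.empty
         (fun m => m.insert pp.1 (pp.2.foldl (fun dd q => dd.insert q.1 q.2) PySem.Dict.empty))))
    (st.1.insert nd.1 PySem.Dict.empty, st.2.insert nd.1 PySem.Dict.empty)

def compute_profiles (nodes : List (Int × Int)) (csp_edges : List (Int × Int × (List (String × List Int)) × (List (String × List Int)))) : (List (Int × List (Int × List Int))) × (List (Int × List (Int × List (Int × String)))) :=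
  let nek := pvNekA csp_edges
  let st := (PySem.Dict.ofList nodes).items.foldl (pvNodeStepA nek)
    (PySem.Dict.empty, PySem.Dict.empty)
  (st.1.items.map (fun p => (p.1, p.2.items)),
   st.2.items.map (fun p => (p.1, p.2.items.map (fun q => (q.1, q.2.items)))))

-- ===== PORT B =====
-- inv = {idx: key for key, indices in g.items() for idx in indices}
def pvInvB (g : List (String × List Int)) : PySem.Dict Int String :=
  PySem.Dict.ofList ((PySem.Dict.ofList g).items.flatMap (fun kv => kv.2.map (fun idx => (idx, kv.1))))

-- B's first loop: the flat 'entries' list, two appends per edge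
def pvEntriesB (csp_edges : List (Int × Int × (List (String × List Int)) × (List (String × List Int)))) :
    List (Int × Int × PySem.Dict Int String) :=
  (PySem.List.enumerate csp_edges 0).foldl
    (fun es ee =>
      (es ++ [(ee.2.1, ee.1, pvInvB ee.2.2.2.1)]) ++ [(ee.2.2.1, ee.1, pvInvB ee.2.2.2.2)]) []

-- second pass of B's phase 1: group the flat entries per node
-- ('by_node.setdefault(n, []).append(...)' is setdefault followed by Dict.modify on the now-present key, exactly)
def pvByNodeB (entries : List (Int × Int × PySem.Dict Int String)) :
    PySem.Dict Int (List (Int × PySem.Dict Int String)) :=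
  entries.foldl (fun g e => (g.setdefault e.1 []).modify e.1 [] (· ++ [e.2])) PySem.Dict.empty

-- one refinement step: split every group by this edge's key, extending its signature
-- ('buckets.setdefault(key, []).append(d)' is Dict.modify key [] (· ++ [d]), exactly)
def pvRefineB (eidx : Int) (inv : PySem.Dict Int String)
    (parts : List (List Int × List (Int × String))) : List (List Int × List (Int × String)) :=
  parts.foldl
    (fun refined ms =>
      let buckets := ms.1.foldl (fun b d => b.modify (inv.getD d "?") [] (· ++ [d])) PySem.Dict.empty
      refined ++ buckets.items.map (fun km => (km.2, ms.2 ++ [(eidx, km.1)]))) []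

-- body of B's per-node loop: refine, sort by signature, read both dicts off the sorted parts
def pvNodeB (by_node : PySem.Dict Int (List (Int × PySem.Dict Int String)))
    (st : PySem.Dict Int (PySem.Dict Int (List Int)) × PySem.Dict Int (PySem.Dict Int (PySem.Dict Int String)))
    (nd : Int × Int) :
    PySem.Dict Int (PySem.Dict Int (List Int)) × PySem.Dict Int (PySem.Dict Int (PySem.Dict Int String)) :=
  let members0 := PySem.List.pyRange 0 nd.2 1
  let parts0 : List (List Int × List (Int × String)) := if members0.isEmpty then [] else [(members0, [])]
  let parts := (by_node.getD nd.1 []).foldl (fun ps q => pvRefineB q.1 q.2 ps) parts0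
  let sp := PySem.List.sorted parts (fun p => pvProfKey p.2) false
  (st.1.insert nd.1 (PySem.Dict.ofList ((PySem.List.enumerate sp 0).map (fun pp => (pp.1, pp.2.1)))),
   st.2.insert nd.1 (PySem.Dict.ofList ((PySem.List.enumerate sp 0).map (fun pp => (pp.1, PySem.Dict.ofList pp.2.2)))))

def compute_profiles_alt (nodes : List (Int × Int)) (csp_edges : List (Int × Int × (List (String × List Int)) × (List (String × List Int)))) : (List (Int × List (Int × List Int))) × (List (Int × List (Int × List (Int × String)))) :=
  let entries := pvEntriesB csp_edges
  let by_node := pvByNodeB entries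
  let st := (PySem.Dict.ofList nodes).items.foldl (pvNodeB by_node)
    (PySem.Dict.empty, PySem.Dict.empty)
  (st.1.items.map (fun p => (p.1, p.2.items)),
   st.2.items.map (fun p => (p.1, p.2.items.map (fun q => (q.1, q.2.items)))))

-- ===== PRECONDITION & SPEC =====
-- hand-assembled decidable equality for the result type (instance search alone exceeds its size limit here)
def pvDecEqPair : DecidableEq ((List (Int × List (Int × List Int))) × (List (Int × List (Int × List (Int × String))))) :=
  @instDecidableEqProd _ _ inferInstance
    (@instDecidableEqList _ (inferInstance : DecidableEq (Int × List (Int × List (Int × String)))))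

def Spec_compute_profiles (nodes : List (Int × Int)) (csp_edges : List (Int × Int × (List (String × List Int)) × (List (String × List Int)))) (out : (List (Int × List (Int × List Int))) × (List (Int × List (Int × List (Int × String))))) : Prop := out = compute_profiles_alt nodes csp_edges
instance (nodes : List (Int × Int)) (csp_edges : List (Int × Int × (List (String × List Int)) × (List (String × List Int)))) (out : (List (Int × List (Int × List Int))) × (List (Int × List (Int × List (Int × String))))) : Decidable (Spec_compute_profiles nodes csp_edges out) := by unfold Spec_compute_profiles; exact pvDecEqPair _ _

-- ===== CLAIM (what is proved, stated in full; the proofs are below) =====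
def Claim_equal_compute_profiles : Prop := ∀ (nodes : List (Int × Int)) (csp_edges : List (Int × Int × (List (String × List Int)) × (List (String × List Int)))), Dom_compute_profiles nodes csp_edges → Spec_compute_profiles nodes csp_edges (compute_profiles nodes csp_edges)


-- ===== LEMMAS AND PROOFS =====

-- --- proof-only notation: members of a profile, and the canonical partition ---
def pvMembers (ek : List (Int × PySem.Dict Int String)) (dom : Int) (s : List (Int × String)) : List Int :=
  (PySem.List.pyRange 0 dom 1).filter (fun d => pvProfile ek d == s)

def pvCanon (ek : List (Int × PySem.Dict Int String)) (dom : Int) :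
    List (List Int × List (Int × String)) :=
  (PySem.List.dedup ((PySem.List.pyRange 0 dom 1).map (pvProfile ek))).map
    (fun s => (pvMembers ek dom s, s))

-- the per-node edge list both programs effectively iterate (with A's inverse maps)
def pvChunks (csp_edges : List (Int × Int × (List (String × List Int)) × (List (String × List Int)))) (n : Int) :
    List (Int × PySem.Dict Int String) :=
  (PySem.List.enumerate csp_edges 0).flatMap
    (fun ee => (([(ee.2.1, ee.1, pvInvA ee.2.2.2.1), (ee.2.2.1, ee.1, pvInvA ee.2.2.2.2)].filter
        (fun q => q.1 == n)).map (fun q => q.2)))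

-- the two inverse-map builders agree
theorem pvInv_eq (g : List (String × List Int)) : pvInvA g = pvInvB g := by
  simp [pvInvA, pvInvB, PySem.Dict.ofList, PySem.Dict.update, List.foldl_flatMap, List.foldl_map]

theorem pv_getD_modify_append (d : PySem.Dict Int (List (Int × PySem.Dict Int String)))
    (k n : Int) (x : Int × PySem.Dict Int String) :
    (d.modify k [] (· ++ [x])).getD n [] = d.getD n [] ++ (if n = k then [x] else []) := by
  rw [PySem.Dict.getD_modify]
  split_ifs with h <;> simp [h]

-- A's node_edge_keys, read at n, is the flat per-node chunk list
theorem pvNekA_getD (E : List (Int × Int × Int × (List (String × List Int)) × (List (String × List Int))))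
    (d : PySem.Dict Int (List (Int × PySem.Dict Int String))) (n : Int) :
    (E.foldl (fun nek ee =>
        (nek.modify ee.2.1 [] (· ++ [(ee.1, pvInvA ee.2.2.2.1)])).modify
          ee.2.2.1 [] (· ++ [(ee.1, pvInvA ee.2.2.2.2)])) d).getD n []
      = d.getD n [] ++ E.flatMap (fun ee =>
          (([((ee.2.1 : Int), ee.1, pvInvA ee.2.2.2.1), (ee.2.2.1, ee.1, pvInvA ee.2.2.2.2)].filter
            (fun q => q.1 == n)).map (fun q => q.2))) := by
  induction E generalizing d with
  | nil => simp
  | cons ee E ih =>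
    rw [List.foldl_cons, ih, pv_getD_modify_append, pv_getD_modify_append]
    simp only [List.flatMap_cons, List.filter_cons, List.filter_nil]
    by_cases h1 : ee.2.1 = n <;> by_cases h2 : ee.2.2.1 = n
    · simp [h1, h2, List.append_assoc]
    · have h2x : ¬ n = ee.2.2.1 := fun h => h2 h.symm
      simp [h1, h2, h2x, List.append_assoc]
    · have h1x : ¬ n = ee.2.1 := fun h => h1 h.symm
      simp [h1, h1x, h2, List.append_assoc]
    · have h1x : ¬ n = ee.2.1 := fun h => h1 h.symm
      have h2x : ¬ n = ee.2.2.1 := fun h => h2 h.symm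
      simp [h1, h1x, h2, h2x]

-- every element of the chunk of edge ee carries eidx = ee.1
theorem pv_chunk_fst (ee : Int × Int × Int × (List (String × List Int)) × (List (String × List Int))) (n : Int)
    (q : Int × PySem.Dict Int String)
    (hq : q ∈ ([((ee.2.1 : Int), ee.1, pvInvA ee.2.2.2.1), (ee.2.2.1, ee.1, pvInvA ee.2.2.2.2)].filter
      (fun q => q.1 == n)).map (fun q => q.2)) : q.1 = ee.1 := by
  simp only [List.mem_map, List.mem_filter] at hq
  obtain ⟨a, ⟨ha, _⟩, rfl⟩ := hq
  simp only [List.mem_cons, List.not_mem_nil, or_false] at ha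
  rcases ha with rfl | rfl <;> rfl

-- the chunk list is nondecreasing in eidx, so A's sorted() leaves it unchanged
theorem pvChunks_pairwise (csp_edges : List (Int × Int × (List (String × List Int)) × (List (String × List Int)))) (n : Int) :
    (pvChunks csp_edges n).Pairwise (fun a b => a.1 ≤ b.1) := by
  unfold pvChunks
  rw [List.pairwise_flatMap]
  constructor
  · intro ee _
    apply List.pairwise_of_forall_mem_list
    intro x hx y hy
    rw [pv_chunk_fst ee n x hx, pv_chunk_fst ee n y hy]
  · apply (PySem.List.pairwise_lt_enumerate csp_edges 0).imp
    intro a b hab x hx y hy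
    rw [pv_chunk_fst a n x hx, pv_chunk_fst b n y hy]
    exact le_of_lt hab

theorem pv_ekA_eq_chunks (ces : List (Int × Int × (List (String × List Int)) × (List (String × List Int)))) (n : Int) :
    PySem.List.sorted ((pvNekA ces).getD n []) (fun x => x.1) false = pvChunks ces n := by
  have h : (pvNekA ces).getD n [] = pvChunks ces n := by
    unfold pvNekA pvChunks
    rw [pvNekA_getD]
    simp
  rw [h]
  exact PySem.List.sorted_eq_self_of_pairwise _ _ (pvChunks_pairwise ces n)

-- setdefault-then-append is defaultdict-append
theorem pv_setdefault_modify {KT VT : Type} [BEq KT] [LawfulBEq KT]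
    (d : PySem.Dict KT (List VT)) (k : KT) (f : List VT → List VT) :
    (d.setdefault k []).modify k [] f = d.modify k [] f := by
  by_cases h : d.contains k = true
  · rw [PySem.Dict.setdefault_of_contains d _ h]
  · have h' : d.contains k = false := by simpa using h
    rw [PySem.Dict.setdefault_of_not_contains d _ h']
    unfold PySem.Dict.modify
    rw [PySem.Dict.insert_insert_self, PySem.Dict.getD_insert_self,
      PySem.Dict.getD_of_not_contains d _ h']

-- reading B's per-node grouping at n gives the entries of node n, in order
theorem pv_byNode_getD (L : List (Int × Int × PySem.Dict Int String))
    (d : PySem.Dict Int (List (Int × PySem.Dict Int String))) (n : Int) :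
    (L.foldl (fun g e => (g.setdefault e.1 []).modify e.1 [] (· ++ [e.2])) d).getD n []
      = d.getD n [] ++ (L.filter (fun e => e.1 == n)).map (fun e => e.2) := by
  induction L generalizing d with
  | nil => simp
  | cons e L ih =>
    rw [List.foldl_cons, ih, pv_setdefault_modify, pv_getD_modify_append]
    rw [List.filter_cons]
    by_cases h1 : e.1 = n
    · simp [h1, List.append_assoc]
    · have h1x : ¬ n = e.1 := fun h => h1 h.symm
      simp [h1, h1x]

-- B's filtered entries list is the same chunk list
theorem pv_ekB_eq_chunks (ces : List (Int × Int × (List (String × List Int)) × (List (String × List Int)))) (n : Int) :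
    ((pvEntriesB ces).filter (fun e => e.1 == n)).map (fun e => e.2) = pvChunks ces n := by
  unfold pvEntriesB pvChunks
  simp only [List.append_assoc]
  rw [PySem.List.foldl_append_eq_flatMap
    (fun (ee : Int × Int × Int × (List (String × List Int)) × (List (String × List Int))) =>
      [(ee.2.1, ee.1, pvInvB ee.2.2.2.1)] ++ [(ee.2.2.1, ee.1, pvInvB ee.2.2.2.2)])
    (PySem.List.enumerate ces 0) []]
  simp [List.filter_flatMap, List.map_flatMap, List.filter_cons, pvInv_eq]

-- --- the bucket dict of one group, as a list ---
theorem pv_buckets_items (inv : PySem.Dict Int String) (m : List Int) :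
    (m.foldl (fun b d => b.modify (inv.getD d "?") [] (· ++ [d])) PySem.Dict.empty).items
      = (PySem.List.dedup (m.map (fun d => inv.getD d "?"))).map
          (fun k => (k, m.filter (fun d => inv.getD d "?" == k))) := by
  have hnd : (m.foldl (fun b d => b.modify (inv.getD d "?") [] (· ++ [d])) PySem.Dict.empty).keys.Nodup := by
    apply PySem.Dict.nodup_keys_foldl_modify_key (key := fun d => inv.getD d "?")
      (f := fun _ d => (· ++ [d]))
    simp [PySem.Dict.keys_empty]
  rw [PySem.Dict.items_eq_map_keys _ hnd []]
  rw [PySem.Dict.keys_foldl_modify_key (key := fun d => inv.getD d "?") (f := fun _ d => (· ++ [d]))]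
  rw [PySem.List.dedup_eq_ofList]
  have hk : PySem.Set.update (PySem.Dict.empty : PySem.Dict String (List Int)).keys
        (m.map fun d => inv.getD d "?")
      = PySem.Set.ofList (m.map fun d => inv.getD d "?") := by
    simp [PySem.Set.ofList_eq_foldl, PySem.Set.update, PySem.Dict.keys_empty]
  rw [hk]
  apply List.map_congr_left
  intro k _
  rw [show (m.foldl (fun b d => b.modify (inv.getD d "?") [] (· ++ [d])) PySem.Dict.empty)
      = ((m.map (fun d => (inv.getD d "?", d))).foldl
          (fun b p => b.modify p.1 [] (· ++ [p.2])) PySem.Dict.empty)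
    from (List.foldl_map (f := fun d => (inv.getD d "?", d))
      (g := fun (b : PySem.Dict String (List Int)) (p : String × Int) => b.modify p.1 [] (fun x => x ++ [p.2]))).symm]
  rw [PySem.Dict.getD_foldl_modify_append]
  simp [List.filter_map, Function.comp_def]

-- one refinement step is a flatMap over the groups
theorem pvRefineB_eq_flatMap (eidx : Int) (inv : PySem.Dict Int String)
    (parts : List (List Int × List (Int × String))) :
    pvRefineB eidx inv parts = parts.flatMap (fun ms =>
      (PySem.List.dedup (ms.1.map (fun d => inv.getD d "?"))).map
        (fun k => (ms.1.filter (fun d => inv.getD d "?" == k), ms.2 ++ [(eidx, k)]))) := by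
  have h := PySem.List.foldl_append_eq_flatMap
    (fun ms : List Int × List (Int × String) =>
      ((ms.1.foldl (fun b d => b.modify (inv.getD d "?") [] (· ++ [d])) PySem.Dict.empty).items).map
        (fun km => (km.2, ms.2 ++ [(eidx, km.1)])))
    parts []
  calc pvRefineB eidx inv parts
      = parts.foldl (fun acc ms =>
          acc ++ ((ms.1.foldl (fun b d => b.modify (inv.getD d "?") [] (· ++ [d]))
            PySem.Dict.empty).items).map (fun km => (km.2, ms.2 ++ [(eidx, km.1)]))) [] := rfl
    _ = _ := by
        rw [h]
        simp only [List.nil_append]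
        apply List.flatMap_congr ?_
        intro ms _
        rw [pv_buckets_items]
        simp [List.map_map, Function.comp_def]

theorem pvProfile_length (ek : List (Int × PySem.Dict Int String)) (d : Int) :
    (pvProfile ek d).length = ek.length := by simp [pvProfile]

theorem pvProfile_append (ek : List (Int × PySem.Dict Int String)) (e : Int × PySem.Dict Int String) (d : Int) :
    pvProfile (ek ++ [e]) d = pvProfile ek d ++ [(e.1, e.2.getD d "?")] := by
  simp [pvProfile]

theorem pv_split (ek : List (Int × PySem.Dict Int String)) (e : Int × PySem.Dict Int String)
    {s : List (Int × String)} (hs : s.length = ek.length) (d : Int) (k : String) :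
    pvProfile (ek ++ [e]) d = s ++ [(e.1, k)] ↔ (pvProfile ek d = s ∧ e.2.getD d "?" = k) := by
  rw [pvProfile_append]
  constructor
  · intro h
    have h2 := List.append_inj h (by rw [pvProfile_length, hs])
    exact ⟨h2.1, by simpa using h2.2⟩
  · rintro ⟨h1, h2⟩
    rw [h1, h2]

theorem pv_members_ext (ek : List (Int × PySem.Dict Int String)) (e : Int × PySem.Dict Int String)
    (dom : Int) {s : List (Int × String)} (hs : s.length = ek.length) (k : String) :
    pvMembers (ek ++ [e]) dom (s ++ [(e.1, k)])
      = (pvMembers ek dom s).filter (fun d => e.2.getD d "?" == k) := by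
  unfold pvMembers
  rw [List.filter_filter]
  apply List.filter_congr
  intro d _
  rw [Bool.beq_eq_decide_eq, Bool.beq_eq_decide_eq, Bool.beq_eq_decide_eq]
  rw [show (decide (pvProfile (ek ++ [e]) d = s ++ [(e.1, k)]))
      = decide (pvProfile ek d = s ∧ e.2.getD d "?" = k) from
    decide_eq_decide.mpr (pv_split ek e hs d k)]
  rw [Bool.decide_and, Bool.and_comm]

-- every profile in the deduped profile list has the length of the edge list
theorem pv_mem_dedup_length (ek : List (Int × PySem.Dict Int String)) (dom : Int)
    {s : List (Int × String)}
    (h : s ∈ PySem.List.dedup ((PySem.List.pyRange 0 dom 1).map (pvProfile ek))) :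
    s.length = ek.length := by
  rw [PySem.List.mem_dedup] at h
  obtain ⟨d, _, rfl⟩ := List.mem_map.mp h
  exact pvProfile_length ek d

-- one refinement step carries the canonical partition of ek to that of ek ++ [e]
theorem pv_canon_nodup (ek : List (Int × PySem.Dict Int String)) (dom : Int) :
    (pvCanon ek dom).Nodup := by
  unfold pvCanon
  apply List.Nodup.map ?_ (PySem.List.nodup_dedup _)
  intro a b h
  exact congrArg Prod.snd h

theorem pv_refined_nodup (ek : List (Int × PySem.Dict Int String))
    (e : Int × PySem.Dict Int String) (dom : Int) :
    ((pvCanon ek dom).flatMap (fun ms =>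
        (PySem.List.dedup (ms.1.map (fun d => e.2.getD d "?"))).map
          (fun k => (ms.1.filter (fun d => e.2.getD d "?" == k), ms.2 ++ [(e.1, k)])))).Nodup := by
  apply List.Nodup.of_map (f := fun x => x.2)
  rw [List.map_flatMap]
  have hrw : (fun ms : List Int × List (Int × String) =>
        ((PySem.List.dedup (ms.1.map (fun d => e.2.getD d "?"))).map
          (fun k => (ms.1.filter (fun d => e.2.getD d "?" == k), ms.2 ++ [(e.1, k)]))).map
            (fun x => x.2))
      = (fun ms : List Int × List (Int × String) =>
        (PySem.List.dedup (ms.1.map (fun d => e.2.getD d "?"))).map (fun k => ms.2 ++ [(e.1, k)])) := by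
    funext ms
    simp [List.map_map, Function.comp_def]
  rw [hrw, List.flatMap_def, List.nodup_flatten]
  constructor
  · intro l hl
    obtain ⟨ms, _, rfl⟩ := List.mem_map.mp hl
    apply List.Nodup.map ?_ (PySem.List.nodup_dedup _)
    intro a b hab
    have h2 := List.append_cancel_left hab
    simpa using h2
  · have hP : (pvCanon ek dom).Pairwise
        (fun a b => a.2 ≠ b.2 ∧ a.2.length = ek.length ∧ b.2.length = ek.length) := by
      unfold pvCanon
      rw [List.pairwise_map]
      apply List.Pairwise.imp_of_mem ?_ (PySem.List.nodup_dedup _)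
      intro a b ha hb hne
      exact ⟨by simpa using hne, pv_mem_dedup_length ek dom ha, pv_mem_dedup_length ek dom hb⟩
    rw [List.pairwise_map]
    apply hP.imp
    rintro a b ⟨hne, hla, hlb⟩ x hx1 hx2
    obtain ⟨k1, _, rfl⟩ := List.mem_map.mp hx1
    obtain ⟨k2, _, heq⟩ := List.mem_map.mp hx2
    exact hne ((List.append_inj heq (hlb.trans hla.symm)).1).symm

theorem pv_canon_append_perm (ek : List (Int × PySem.Dict Int String))
    (e : Int × PySem.Dict Int String) (dom : Int) :
    ((pvCanon ek dom).flatMap (fun ms =>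
        (PySem.List.dedup (ms.1.map (fun d => e.2.getD d "?"))).map
          (fun k => (ms.1.filter (fun d => e.2.getD d "?" == k), ms.2 ++ [(e.1, k)])))).Perm
      (pvCanon (ek ++ [e]) dom) := by
  apply (List.perm_ext_iff_of_nodup (pv_refined_nodup ek e dom) (pv_canon_nodup _ dom)).mpr
  intro x
  constructor
  · intro hx
    obtain ⟨ms, hms, hxe⟩ := List.mem_flatMap.mp hx
    obtain ⟨s, hs, rfl⟩ := List.mem_map.mp hms
    obtain ⟨k, hk, rfl⟩ := List.mem_map.mp hxe
    obtain ⟨d1, hd1, rfl⟩ := List.mem_map.mp ((PySem.List.mem_dedup _ _).mp hk)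
    have hd1' := List.mem_filter.mp hd1
    have hprof : pvProfile ek d1 = s := by simpa using hd1'.2
    have hsl : s.length = ek.length := pv_mem_dedup_length ek dom hs
    have hext : pvProfile (ek ++ [e]) d1 = s ++ [(e.1, e.2.getD d1 "?")] :=
      (pv_split ek e hsl d1 _).mpr ⟨hprof, rfl⟩
    apply List.mem_map.mpr
    refine ⟨s ++ [(e.1, e.2.getD d1 "?")], ?_, ?_⟩
    · exact (PySem.List.mem_dedup _ _).mpr (List.mem_map.mpr ⟨d1, hd1'.1, hext⟩)
    · rw [pv_members_ext ek e dom hsl]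
  · intro hx
    obtain ⟨s', hs', rfl⟩ := List.mem_map.mp hx
    obtain ⟨d, hd, rfl⟩ := List.mem_map.mp ((PySem.List.mem_dedup _ _).mp hs')
    apply List.mem_flatMap.mpr
    refine ⟨(pvMembers ek dom (pvProfile ek d), pvProfile ek d), ?_, ?_⟩
    · exact List.mem_map.mpr ⟨pvProfile ek d,
        (PySem.List.mem_dedup _ _).mpr (List.mem_map.mpr ⟨d, hd, rfl⟩), rfl⟩
    · apply List.mem_map.mpr
      refine ⟨e.2.getD d "?", ?_, ?_⟩
      · apply (PySem.List.mem_dedup _ _).mpr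
        apply List.mem_map.mpr
        exact ⟨d, List.mem_filter.mpr ⟨hd, by simp⟩, rfl⟩
      · rw [pvProfile_append, pv_members_ext ek e dom (pvProfile_length ek d)]

theorem pv_dedup_map_const (xs : List Int) (c : List (Int × String)) (h : xs ≠ []) :
    PySem.List.dedup (xs.map (fun _ => c)) = [c] := by
  rw [PySem.List.dedup_eq_ofList, PySem.Set.ofList_eq_foldl]
  obtain ⟨y, ys, rfl⟩ := List.exists_cons_of_ne_nil h
  have haux : ∀ (l : List Int), (l.map (fun _ => c)).foldl PySem.Set.add [c] = [c] := by
    intro l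
    induction l with
    | nil => rfl
    | cons z zs ih => simpa [PySem.Set.add] using ih
  simpa [PySem.Set.add] using haux ys

theorem pv_core_perm (ek : List (Int × PySem.Dict Int String)) (dom : Int) :
    (ek.foldl (fun ps e => pvRefineB e.1 e.2 ps)
        (if (PySem.List.pyRange 0 dom 1).isEmpty then [] else [(PySem.List.pyRange 0 dom 1, [])])).Perm
      (pvCanon ek dom) := by
  induction ek using List.reverseRecOn with
  | nil =>
    have hbase : (if (PySem.List.pyRange 0 dom 1).isEmpty then ([] : List (List Int × List (Int × String)))
        else [(PySem.List.pyRange 0 dom 1, [])]) = pvCanon [] dom := by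
      by_cases h : (PySem.List.pyRange 0 dom 1).isEmpty
      · have h' : PySem.List.pyRange 0 dom 1 = [] := by simpa [List.isEmpty_iff] using h
        simp [pvCanon, h', PySem.List.dedup_eq_ofList, PySem.Set.ofList_eq_foldl]
      · have h' : PySem.List.pyRange 0 dom 1 ≠ [] := by simpa [List.isEmpty_iff] using h
        rw [if_neg h]
        unfold pvCanon
        rw [show ((PySem.List.pyRange 0 dom 1).map (pvProfile [])) =
            ((PySem.List.pyRange 0 dom 1).map (fun _ => ([] : List (Int × String)))) from
          List.map_congr_left (fun d _ => rfl)]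
        rw [pv_dedup_map_const _ _ h']
        simp [pvMembers, pvProfile]
    simp only [List.foldl_nil]
    rw [hbase]
  | append_singleton ek e ih =>
    rw [List.foldl_append]
    simp only [List.foldl_cons, List.foldl_nil]
    rw [pvRefineB_eq_flatMap]
    exact (List.Perm.flatMap_right _ ih).trans (pv_canon_append_perm ek e dom)

-- A's group lookup is the members list
theorem pv_groups_getD (ek : List (Int × PySem.Dict Int String)) (dom : Int) (s : List (Int × String)) :
    ((PySem.List.pyRange 0 dom 1).foldl
        (fun d i => d.modify (pvProfile ek i) [] (· ++ [i])) PySem.Dict.empty).getD s []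
      = pvMembers ek dom s := by
  rw [show ((PySem.List.pyRange 0 dom 1).foldl
        (fun d i => d.modify (pvProfile ek i) [] (· ++ [i])) PySem.Dict.empty)
      = (((PySem.List.pyRange 0 dom 1).map (fun i => (pvProfile ek i, i))).foldl
          (fun d p => d.modify p.1 [] (· ++ [p.2])) PySem.Dict.empty)
    from (List.foldl_map (f := fun i => (pvProfile ek i, i))
      (g := fun (d : PySem.Dict (List (Int × String)) (List Int)) (p : (List (Int × String)) × Int) => d.modify p.1 [] (fun x => x ++ [p.2]))).symm]
  rw [PySem.Dict.getD_foldl_modify_append]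
  simp [pvMembers, List.filter_map, Function.comp_def]

-- A's group keys are the deduped profile list
theorem pv_groups_keys (ek : List (Int × PySem.Dict Int String)) (dom : Int) :
    ((PySem.List.pyRange 0 dom 1).foldl
        (fun d i => d.modify (pvProfile ek i) [] (· ++ [i])) PySem.Dict.empty).keys
      = PySem.List.dedup ((PySem.List.pyRange 0 dom 1).map (pvProfile ek)) := by
  rw [PySem.Dict.keys_foldl_modify_key (key := pvProfile ek) (f := fun _ i => (· ++ [i])),
    PySem.List.dedup_eq_ofList]
  simp [PySem.Set.ofList_eq_foldl, PySem.Set.update, PySem.Dict.keys_empty]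

theorem pv_sorted_bridge {α : Type} (xs : List α) (key : α → List (Lex (Int × List Char))) :
    PySem.List.sorted xs key false
      = @PySem.List.sorted α _ List.instLinearOrder.toLT
          (@LinearOrder.toDecidableLT _ List.instLinearOrder) xs key false := by
  congr 1

theorem pvProfKey_injective : Function.Injective pvProfKey := by
  intro a b h
  have := congrArg (List.map (fun q : Lex (Int × List Char) => ((ofLex q).1, String.ofList (ofLex q).2))) h
  simpa [pvProfKey, List.map_map, Function.comp_def, String.ofList_toList] using this

-- the two sorted lists line up
theorem pv_sorted_rel (ek : List (Int × PySem.Dict Int String)) (dom : Int) :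
    PySem.List.sorted (ek.foldl (fun ps e => pvRefineB e.1 e.2 ps)
        (if (PySem.List.pyRange 0 dom 1).isEmpty then [] else [(PySem.List.pyRange 0 dom 1, [])]))
      (fun p => pvProfKey p.2) false
    = (PySem.List.sorted (PySem.List.dedup ((PySem.List.pyRange 0 dom 1).map (pvProfile ek))) pvProfKey false).map
        (fun s => (pvMembers ek dom s, s)) := by
  have hperm : ((PySem.List.sorted
        (PySem.List.dedup ((PySem.List.pyRange 0 dom 1).map (pvProfile ek))) pvProfKey false).map
          (fun s => (pvMembers ek dom s, s))).Perm
      (ek.foldl (fun ps e => pvRefineB e.1 e.2 ps)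
        (if (PySem.List.pyRange 0 dom 1).isEmpty then [] else [(PySem.List.pyRange 0 dom 1, [])])) := by
    have h1 := PySem.List.sorted_perm
      (PySem.List.dedup ((PySem.List.pyRange 0 dom 1).map (pvProfile ek))) pvProfKey false
    exact (h1.map (fun s => (pvMembers ek dom s, s))).trans (pv_core_perm ek dom).symm
  have hpair : ((PySem.List.sorted
        (PySem.List.dedup ((PySem.List.pyRange 0 dom 1).map (pvProfile ek))) pvProfKey false).map
          (fun s => (pvMembers ek dom s, s))).Pairwise
      (fun a b => pvProfKey a.2 < pvProfKey b.2) := by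
    rw [List.pairwise_map, pv_sorted_bridge]
    have hle := PySem.List.sorted_pairwise
      (PySem.List.dedup ((PySem.List.pyRange 0 dom 1).map (pvProfile ek))) pvProfKey
    have hnd : List.Pairwise (fun a b : List (Int × String) => a ≠ b) (PySem.List.sorted
        (PySem.List.dedup ((PySem.List.pyRange 0 dom 1).map (pvProfile ek))) pvProfKey false) :=
      (PySem.List.sorted_perm _ _ _).nodup_iff.mpr (PySem.List.nodup_dedup _)
    rw [pv_sorted_bridge] at hnd
    apply (hle.and hnd).imp
    rintro a b ⟨h1, h2⟩
    exact lt_of_le_of_ne h1 (fun hk => h2 (pvProfKey_injective hk))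
  rw [pv_sorted_bridge] at hperm
  rw [pv_sorted_bridge] at hpair
  rw [pv_sorted_bridge, pv_sorted_bridge]
  exact PySem.List.sorted_eq_of_perm_of_pairwise_lt _ _ (fun p => pvProfKey p.2) hperm hpair

theorem pv_enumerate_map {A B : Type} (f : A → B) (l : List A) (s : Int) :
    PySem.List.enumerate (l.map f) s = (PySem.List.enumerate l s).map (fun p => (p.1, f p.2)) := by
  induction l generalizing s with
  | nil => simp [PySem.List.enumerate_nil]
  | cons x xs ih => simp [PySem.List.enumerate_cons, ih]

theorem pv_pair_fold (k : Int) (memf : List (Int × String) → List Int)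
    (L : List (Int × List (Int × String)))
    (d1 : PySem.Dict Int (PySem.Dict Int (List Int)))
    (d2 : PySem.Dict Int (PySem.Dict Int (PySem.Dict Int String)))
    (m1 : PySem.Dict Int (List Int)) (m2 : PySem.Dict Int (PySem.Dict Int String)) :
    L.foldl (fun st2 pp =>
        (st2.1.modify k PySem.Dict.empty (fun m => m.insert pp.1 (memf pp.2)),
         st2.2.modify k PySem.Dict.empty
           (fun m => m.insert pp.1 (pp.2.foldl (fun dd q => dd.insert q.1 q.2) PySem.Dict.empty))))
      (d1.insert k m1, d2.insert k m2)
    = (d1.insert k (L.foldl (fun m pp => m.insert pp.1 (memf pp.2)) m1),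
       d2.insert k (L.foldl (fun m pp =>
         m.insert pp.1 (pp.2.foldl (fun dd q => dd.insert q.1 q.2) PySem.Dict.empty)) m2)) := by
  induction L generalizing m1 m2 with
  | nil => rfl
  | cons pp L ih =>
    simp only [List.foldl_cons]
    have e1 : ((d1.insert k m1).modify k PySem.Dict.empty (fun m => m.insert pp.1 (memf pp.2)))
        = d1.insert k (m1.insert pp.1 (memf pp.2)) := by
      unfold PySem.Dict.modify
      rw [PySem.Dict.getD_insert_self, PySem.Dict.insert_insert_self]
    have e2 : ((d2.insert k m2).modify k PySem.Dict.empty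
          (fun m => m.insert pp.1 (pp.2.foldl (fun dd q => dd.insert q.1 q.2) PySem.Dict.empty)))
        = d2.insert k (m2.insert pp.1 (pp.2.foldl (fun dd q => dd.insert q.1 q.2) PySem.Dict.empty)) := by
      unfold PySem.Dict.modify
      rw [PySem.Dict.getD_insert_self, PySem.Dict.insert_insert_self]
    rw [e1, e2]
    exact ih _ _

-- the per-node bodies agree
theorem pvNodeStep_eq (ces : List (Int × Int × (List (String × List Int)) × (List (String × List Int)))) :
    pvNodeStepA (pvNekA ces) = pvNodeB (pvByNodeB (pvEntriesB ces)) := by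
  funext st nd
  simp only [pvNodeStepA, pvNodeB]
  rw [pv_ekA_eq_chunks]
  rw [show (pvByNodeB (pvEntriesB ces)).getD nd.1 [] = pvChunks ces nd.1 from by
    unfold pvByNodeB
    rw [pv_byNode_getD]
    simpa using pv_ekB_eq_chunks ces nd.1]
  rw [pv_groups_keys, pv_sorted_rel, pv_enumerate_map]
  rw [pv_pair_fold nd.1
    (fun s => ((PySem.List.pyRange 0 nd.2 1).foldl
        (fun d i => d.modify (pvProfile (pvChunks ces nd.1) i) [] (· ++ [i]))
        PySem.Dict.empty).getD s [])]
  simp only [pv_groups_getD]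
  simp [PySem.Dict.ofList, PySem.Dict.update, PySem.Dict.empty, List.foldl_map, List.map_map,
    Function.comp_def]

theorem pv_main (nodes : List (Int × Int)) (csp_edges : List (Int × Int × (List (String × List Int)) × (List (String × List Int)))) :
    compute_profiles nodes csp_edges = compute_profiles_alt nodes csp_edges := by
  simp only [compute_profiles, compute_profiles_alt, pvNodeStep_eq]

-- ===== VERDICT (by name: the statement is the Claim_ definition above) =====
theorem compute_profiles_spec : Claim_equal_compute_profiles := by
  intro nodes csp_edges _
  unfold Spec_compute_profiles
  exact pv_main nodes csp_edges
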